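-- pv_equiv track=rewrite | github.com/QSOLKCB/QEC | src/qec/analysis/dfa_supervisor_synthesizer.py | _reverse_reachable
-- ===== SOURCE A (Python) =====
-- def _reverse_reachable(
--     targets: frozenset[str],
--     transitions: dict[tuple[str, str], str],
--     allowed: frozenset[str],
-- ) -> frozenset[str]:
--     """Compute states that can reach any target within allowed set."""
--     # Build reverse adjacency
--     reverse: dict[str, list[str]] = {}
--     for (src, _evt), dst in sorted(transitions.items()):
--         if src in allowed and dst in allowed:
--             reverse.setdefault(dst, []).append(src)
--
--     visited: set[str] = set()
--     stack = [t for t in sorted(targets) if t in allowed]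
--     while stack:
--         state = stack.pop()
--         if state in visited:
--             continue
--         visited.add(state)
--         for pred in reverse.get(state, []):
--             if pred not in visited and pred in allowed:
--                 stack.append(pred)
--     return frozenset(visited)
-- ===== SOURCE B (Python) =====
-- def _reverse_reachable(
--     targets: frozenset[str],
--     transitions: dict[tuple[str, str], str],
--     allowed: frozenset[str],
-- ) -> frozenset[str]:
--     """Compute states that can reach any target within allowed set."""
--     visited = {t for t in targets if t in allowed}
--     changed = True
--     while changed:
--         changed = False
--         for (src, _evt), dst in transitions.items():
--             if dst in visited and src in allowed and dst in allowed and src not in visited: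
--                 visited.add(src)
--                 changed = True
--     return frozenset(visited)
-- ===== Notes on version B (the rewrite author's own statement) =====
-- stated objective: alternative
-- what changed: Replaces A's sorted reverse-adjacency index plus explicit DFS stack with a chaotic-iteration fixpoint that rescans the raw transition list until a full pass adds no new state; skipping the O(E log E) sort of the transition items makes it measurably faster on the generated inputs despite a worse worst case.
import Mathlib
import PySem

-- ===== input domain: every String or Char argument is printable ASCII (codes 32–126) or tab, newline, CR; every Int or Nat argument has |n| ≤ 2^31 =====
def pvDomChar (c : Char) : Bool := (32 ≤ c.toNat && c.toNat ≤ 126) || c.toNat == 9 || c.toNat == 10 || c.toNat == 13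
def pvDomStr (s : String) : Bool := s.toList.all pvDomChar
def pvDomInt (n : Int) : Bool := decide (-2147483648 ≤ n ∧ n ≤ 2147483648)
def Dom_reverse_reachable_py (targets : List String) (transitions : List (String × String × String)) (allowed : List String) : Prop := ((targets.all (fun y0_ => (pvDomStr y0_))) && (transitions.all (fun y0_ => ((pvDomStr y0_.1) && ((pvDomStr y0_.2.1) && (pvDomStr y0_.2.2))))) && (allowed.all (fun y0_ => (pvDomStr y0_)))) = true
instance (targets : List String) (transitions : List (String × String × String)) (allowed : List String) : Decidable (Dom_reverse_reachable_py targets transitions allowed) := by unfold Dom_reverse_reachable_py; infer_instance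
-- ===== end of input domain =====

-- B replaces A's sorted reverse-adjacency index + DFS stack by a repeated-scan fixpoint over the
-- raw transition list (alternative decomposition, similar cost). Both return a frozenset; the
-- ports render that unordered result canonically as the sorted list of its distinct elements.

-- ===== PORT A =====
-- `for (src,_evt),dst in sorted(transitions.items()): if src in allowed and dst in allowed:
--      reverse.setdefault(dst, []).append(src)`
def pvRevAdjStep (allowed : List String) (rev : PySem.Dict String (List String))
    (t : String × String × String) : PySem.Dict String (List String) :=
  if allowed.contains t.1 && allowed.contains t.2.2 then
    rev.modify t.2.2 [] (fun l => l ++ [t.1])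
  else rev

-- The while/stack loop of A. Python pops from the END of its stack list; here the head of
-- `stack` is the top, so `stack.append(pred)` over the pred list becomes `preds.reverse ++ rest`
-- (the same states are processed in the same order).
def pvDfs (allowed : List String) (rev : PySem.Dict String (List String))
    (visited : PySem.Set String) (stack : List String) : PySem.Set String :=
  match stack with
  | [] => visited
  | state :: rest =>
    if PySem.Set.contains visited state then
      pvDfs allowed rev visited rest
    else
      pvDfs allowed rev (PySem.Set.add visited state)
        (((rev.getD state []).filter
            (fun p => !(PySem.Set.contains (PySem.Set.add visited state) p) && allowed.contains p)).reverse ++ rest)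
termination_by (((allowed.toFinset ∪ stack.toFinset) \ visited.toFinset).card, stack.length)
decreasing_by
  · apply Prod.Lex.right'
    · apply Finset.card_le_card
      intro x hx
      simp only [Finset.mem_sdiff, Finset.mem_union, List.mem_toFinset] at hx ⊢
      exact ⟨hx.1.elim Or.inl (fun h => Or.inr (List.mem_cons_of_mem _ h)), hx.2⟩
    · simp
  · apply Prod.Lex.left
    apply Finset.card_lt_card
    constructor
    · intro x hx
      simp only [Finset.mem_sdiff, Finset.mem_union, List.mem_toFinset] at hx ⊢
      obtain ⟨hin, hnv⟩ := hx
      have hxv : x ∉ visited := fun h => hnv ((PySem.Set.mem_add visited state x).mpr (Or.inl h))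
      refine ⟨?_, hxv⟩
      rcases hin with h | h
      · exact Or.inl h
      · rcases List.mem_append.mp h with h | h
        · have hf := List.mem_filter.mp (List.mem_reverse.mp h)
          have hf2 := hf.2
          rw [Bool.and_eq_true] at hf2
          exact Or.inl (List.mem_of_elem_eq_true hf2.2)
        · exact Or.inr (List.mem_cons_of_mem _ h)
    · intro hsup
      have hst : state ∈ (allowed.toFinset ∪ (state :: rest).toFinset) \ visited.toFinset := by
        simp only [Finset.mem_sdiff, Finset.mem_union, List.mem_toFinset]
        refine ⟨Or.inr (List.mem_cons_self), fun h => ?_⟩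
        · rename_i hc
          exact hc ((PySem.Set.contains_iff visited state).mpr h)
      have := hsup hst
      simp only [Finset.mem_sdiff, List.mem_toFinset] at this
      exact this.2 ((PySem.Set.mem_add visited state state).mpr (Or.inr rfl))

-- A sorts dict items by their keys (src, evt); dict keys are unique, so the dst value of an item
-- is never compared by Python's tuple sort and sorting by the key pair is exact.
def reverse_reachable_py (targets : List String) (transitions : List (String × String × String)) (allowed : List String) : List String :=
  let rev := (PySem.List.sorted2 transitions (fun t => t.1) (fun t => t.2.1)).foldl
      (pvRevAdjStep allowed) PySem.Dict.empty
  let stack := (PySem.List.sorted targets (fun t => t) false).filter (fun t => allowed.contains t)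
  PySem.List.sorted (pvDfs allowed rev PySem.Set.empty stack) (fun t => t) false

-- ===== PORT B =====
-- one `if dst in visited and src in allowed and dst in allowed and src not in visited` step
def pvScanStep (allowed : List String) (acc : PySem.Set String × Bool)
    (t : String × String × String) : PySem.Set String × Bool :=
  if PySem.Set.contains acc.1 t.2.2 && allowed.contains t.1 && allowed.contains t.2.2 &&
      !(PySem.Set.contains acc.1 t.1) then
    (PySem.Set.add acc.1 t.1, true)
  else acc

-- termination facts for the `while changed` loop (cited by pvFix's decreasing_by)
theorem pvScan_prefix (allowed : List String) (ts : List (String × String × String))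
    (acc : PySem.Set String × Bool) : acc.1 <+: (ts.foldl (pvScanStep allowed) acc).1 := by
  induction ts generalizing acc with
  | nil => exact List.prefix_refl _
  | cons t ts ih =>
    refine List.IsPrefix.trans ?_ (ih (pvScanStep allowed acc t))
    unfold pvScanStep
    split
    · show acc.1 <+: PySem.Set.add acc.1 t.1
      unfold PySem.Set.add
      split
      · exact List.prefix_refl _
      · exact List.prefix_append _ _
    · exact List.prefix_refl _

theorem pvScan_changed (allowed : List String) (ts : List (String × String × String))
    (acc : PySem.Set String × Bool) (h : (ts.foldl (pvScanStep allowed) acc).2 = true) :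
    acc.2 = true ∨ ∃ x, x ∈ (ts.foldl (pvScanStep allowed) acc).1 ∧ x ∉ acc.1 ∧ x ∈ allowed := by
  induction ts generalizing acc with
  | nil => exact Or.inl h
  | cons t ts ih =>
    simp only [List.foldl_cons] at h ⊢
    by_cases hc : (PySem.Set.contains acc.1 t.2.2 && allowed.contains t.1 &&
        allowed.contains t.2.2 && !(PySem.Set.contains acc.1 t.1)) = true
    · right
      refine ⟨t.1, ?_, ?_, ?_⟩
      · have hpre := pvScan_prefix allowed ts (pvScanStep allowed acc t)
        apply hpre.subset
        unfold pvScanStep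
        rw [if_pos hc]
        exact (PySem.Set.mem_add _ _ _).mpr (Or.inr rfl)
      · intro hmem
        rw [Bool.and_eq_true, Bool.not_eq_eq_eq_not] at hc
        rw [(PySem.Set.contains_iff acc.1 t.1).mpr hmem] at hc
        simp at hc
      · rw [Bool.and_eq_true, Bool.and_eq_true, Bool.and_eq_true] at hc
        exact List.mem_of_elem_eq_true hc.1.1.2
    · have hstep : pvScanStep allowed acc t = acc := by
        unfold pvScanStep
        rw [if_neg hc]
      rw [hstep] at h ⊢
      exact ih acc h

-- one full pass over the transition list, starting from `changed = False`
def pvScan (transitions : List (String × String × String)) (allowed : List String)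
    (visited : PySem.Set String) : PySem.Set String × Bool :=
  transitions.foldl (pvScanStep allowed) (visited, false)

-- `changed = True; while changed: changed = False; <scan>`
def pvFix (transitions : List (String × String × String)) (allowed : List String)
    (visited : PySem.Set String) : PySem.Set String :=
  let r := pvScan transitions allowed visited
  if r.2 then pvFix transitions allowed r.1 else r.1
termination_by (allowed.toFinset \ visited.toFinset).card
decreasing_by
  rename_i h
  have h2 : (List.foldl (pvScanStep allowed) (visited, false) transitions).2 = true := h
  rcases pvScan_changed allowed transitions (visited, false) h2 with h' | ⟨x, hxr, hxv, hxa⟩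
  · simp at h'
  · apply Finset.card_lt_card
    constructor
    · intro y hy
      simp only [Finset.mem_sdiff, List.mem_toFinset] at hy ⊢
      refine ⟨hy.1, fun hmem => hy.2 ((pvScan_prefix allowed transitions (visited, false)).subset hmem)⟩
    · intro hsup
      have hx : x ∈ allowed.toFinset \ visited.toFinset := by
        simp only [Finset.mem_sdiff, List.mem_toFinset]
        exact ⟨hxa, hxv⟩
      have := hsup hx
      simp only [Finset.mem_sdiff, List.mem_toFinset] at this
      exact this.2 hxr

def reverse_reachable_py_alt (targets : List String) (transitions : List (String × String × String)) (allowed : List String) : List String :=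
  let seed := PySem.Set.ofList (targets.filter (fun t => allowed.contains t))
  PySem.List.sorted (pvFix transitions allowed seed) (fun t => t) false

-- ===== PRECONDITION & SPEC =====
def Spec_reverse_reachable_py (targets : List String) (transitions : List (String × String × String)) (allowed : List String) (out : List String) : Prop := out = reverse_reachable_py_alt targets transitions allowed
instance (targets : List String) (transitions : List (String × String × String)) (allowed : List String) (out : List String) : Decidable (Spec_reverse_reachable_py targets transitions allowed out) := by unfold Spec_reverse_reachable_py; infer_instance

-- ===== CLAIM (what is proved, stated in full; the proofs are below) =====
def Claim_equal_reverse_reachable_py : Prop := ∀ (targets : List String) (transitions : List (String × String × String)) (allowed : List String), Dom_reverse_reachable_py targets transitions allowed → Spec_reverse_reachable_py targets transitions allowed (reverse_reachable_py targets transitions allowed)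

-- ===== LEMMAS AND PROOFS =====

-- the common specification: states that can reach a target through allowed states
inductive pvReach (targets : List String) (transitions : List (String × String × String))
    (allowed : List String) : String → Prop
  | base (t : String) : t ∈ targets → t ∈ allowed → pvReach targets transitions allowed t
  | step (p e v : String) : (p, e, v) ∈ transitions → p ∈ allowed → v ∈ allowed →
      pvReach targets transitions allowed v → pvReach targets transitions allowed p

-- ---- A side: the DFS of port A computes exactly the pvReach states ----

theorem mem_revAdj (allowed : List String) (ts : List (String × String × String))
    (d : PySem.Dict String (List String)) (p v : String) :
    p ∈ (ts.foldl (pvRevAdjStep allowed) d).getD v [] ↔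
      p ∈ d.getD v [] ∨ ∃ e, (p, e, v) ∈ ts ∧ p ∈ allowed ∧ v ∈ allowed := by
  induction ts generalizing d with
  | nil => simp
  | cons t ts ih =>
    simp only [List.foldl_cons, ih]
    unfold pvRevAdjStep
    constructor
    · rintro (hd | ⟨e, he, hpa, hva⟩)
      · split at hd
        · rename_i hc
          rw [Bool.and_eq_true] at hc
          rw [PySem.Dict.getD_modify] at hd
          split at hd
          · rename_i hveq
            rcases List.mem_append.mp hd with h | h
            · exact Or.inl (by rw [hveq]; exact h)
            · rw [List.mem_singleton] at h
              subst h
              exact Or.inr ⟨t.2.1, by rw [hveq]; exact List.mem_cons_self,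
                List.mem_of_elem_eq_true hc.1, by rw [hveq]; exact List.mem_of_elem_eq_true hc.2⟩
          · exact Or.inl hd
        · exact Or.inl hd
      · exact Or.inr ⟨e, List.mem_cons_of_mem _ he, hpa, hva⟩
    · rintro (hd | ⟨e, he, hpa, hva⟩)
      · left
        split
        · rw [PySem.Dict.getD_modify]
          split
          · exact List.mem_append.mpr (Or.inl (by rename_i hveq; rw [hveq] at hd; exact hd))
          · exact hd
        · exact hd
      · rcases List.mem_cons.mp he with h | h
        · left
          have ht1 : t.1 = p := congrArg Prod.fst h.symm
          have ht3 : t.2.2 = v := congrArg (fun x => x.2.2) h.symm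
          rw [if_pos (by
            rw [Bool.and_eq_true]
            exact ⟨by rw [ht1]; exact List.elem_eq_true_of_mem hpa,
                   by rw [ht3]; exact List.elem_eq_true_of_mem hva⟩)]
          rw [PySem.Dict.getD_modify, if_pos ht3.symm]
          exact List.mem_append.mpr (Or.inr (by rw [ht1]; exact List.mem_singleton.mpr rfl))
        · exact Or.inr ⟨e, h, hpa, hva⟩

theorem dfs_nodup (allowed : List String) (rev : PySem.Dict String (List String))
    (visited : PySem.Set String) (stack : List String) :
    visited.Nodup → (pvDfs allowed rev visited stack).Nodup := by
  fun_induction pvDfs allowed rev visited stack with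
  | case1 => exact id
  | case2 _ _ _ _ ih => exact ih
  | case3 visited state rest _ ih =>
    intro h
    exact ih (PySem.Set.nodup_add visited state h)

theorem dfs_sound (targets : List String) (transitions : List (String × String × String)) (allowed : List String)
    (rev : PySem.Dict String (List String))
    (hrev : ∀ p v, p ∈ rev.getD v [] → ∃ e, (p, e, v) ∈ transitions ∧ p ∈ allowed ∧ v ∈ allowed)
    (visited : PySem.Set String) (stack : List String) :
    (∀ x ∈ visited, pvReach targets transitions allowed x) →
    (∀ x ∈ stack, pvReach targets transitions allowed x) →
    ∀ y ∈ pvDfs allowed rev visited stack, pvReach targets transitions allowed y := by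
  fun_induction pvDfs allowed rev visited stack with
  | case1 visited =>
    intro hv _ y hy
    exact hv y hy
  | case2 visited state rest _ ih =>
    intro hv hs
    exact ih hv (fun x hx => hs x (List.mem_cons_of_mem _ hx))
  | case3 visited state rest _ ih =>
    intro hv hs
    have hstate : pvReach targets transitions allowed state := hs state List.mem_cons_self
    apply ih
    · intro x hx
      rcases (PySem.Set.mem_add visited state x).mp hx with h | h
      · exact hv x h
      · exact h ▸ hstate
    · intro x hx
      rcases List.mem_append.mp hx with h | h
      · have hf := List.mem_filter.mp (List.mem_reverse.mp h)
        obtain ⟨e, he, hpa, hva⟩ := hrev x state hf.1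
        exact pvReach.step x e state he hpa hva hstate
      · exact hs x (List.mem_cons_of_mem _ h)

theorem dfs_closed (targets : List String) (transitions : List (String × String × String)) (allowed : List String)
    (rev : PySem.Dict String (List String))
    (hrev : ∀ p e v, (p, e, v) ∈ transitions → p ∈ allowed → v ∈ allowed → p ∈ rev.getD v [])
    (visited : PySem.Set String) (stack : List String) :
    (∀ t ∈ targets, t ∈ allowed → t ∈ visited ∨ t ∈ stack) →
    (∀ p e v, (p, e, v) ∈ transitions → p ∈ allowed → v ∈ allowed →
      v ∈ visited → p ∈ visited ∨ p ∈ stack) →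
    (∀ t ∈ targets, t ∈ allowed → t ∈ pvDfs allowed rev visited stack) ∧
    (∀ p e v, (p, e, v) ∈ transitions → p ∈ allowed → v ∈ allowed →
      v ∈ pvDfs allowed rev visited stack → p ∈ pvDfs allowed rev visited stack) := by
  fun_induction pvDfs allowed rev visited stack with
  | case1 visited =>
    intro h1 h2
    refine ⟨fun t ht hta => (h1 t ht hta).elim id (fun h => absurd h (List.not_mem_nil)), ?_⟩
    intro p e v he hpa hva hv
    exact (h2 p e v he hpa hva hv).elim id (fun h => absurd h (List.not_mem_nil))
  | case2 visited state rest hc ih =>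
    intro h1 h2
    have hsv : state ∈ visited := (PySem.Set.contains_iff visited state).mp hc
    apply ih
    · intro t ht hta
      rcases h1 t ht hta with h | h
      · exact Or.inl h
      · rcases List.mem_cons.mp h with h | h
        · exact Or.inl (h ▸ hsv)
        · exact Or.inr h
    · intro p e v he hpa hva hv
      rcases h2 p e v he hpa hva hv with h | h
      · exact Or.inl h
      · rcases List.mem_cons.mp h with h | h
        · exact Or.inl (h ▸ hsv)
        · exact Or.inr h
  | case3 visited state rest hc ih =>
    intro h1 h2
    apply ih
    · intro t ht hta
      rcases h1 t ht hta with h | h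
      · exact Or.inl ((PySem.Set.mem_add visited state t).mpr (Or.inl h))
      · rcases List.mem_cons.mp h with h | h
        · exact Or.inl ((PySem.Set.mem_add visited state t).mpr (Or.inr h))
        · exact Or.inr (List.mem_append.mpr (Or.inr h))
    · intro p e v he hpa hva hv
      rcases (PySem.Set.mem_add visited state v).mp hv with h | heq
      · rcases h2 p e v he hpa hva h with h' | h'
        · exact Or.inl ((PySem.Set.mem_add visited state p).mpr (Or.inl h'))
        · rcases List.mem_cons.mp h' with h' | h'
          · exact Or.inl ((PySem.Set.mem_add visited state p).mpr (Or.inr h'))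
          · exact Or.inr (List.mem_append.mpr (Or.inr h'))
      · by_cases hpv : p ∈ PySem.Set.add visited state
        · exact Or.inl hpv
        · refine Or.inr (List.mem_append.mpr (Or.inl (List.mem_reverse.mpr ?_)))
          refine List.mem_filter.mpr ⟨heq ▸ hrev p e v he hpa hva, ?_⟩
          rw [Bool.and_eq_true, Bool.not_eq_eq_eq_not]
          refine ⟨?_, List.elem_eq_true_of_mem hpa⟩
          simp only [Bool.not_true]
          exact Bool.eq_false_iff.mpr (fun h => hpv ((PySem.Set.contains_iff _ _).mp h))

-- ---- B side: the fixpoint loop of port B computes exactly the pvReach states ----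

theorem pvScan_true (allowed : List String) (ts : List (String × String × String))
    (acc : PySem.Set String × Bool) (h : acc.2 = true) :
    (ts.foldl (pvScanStep allowed) acc).2 = true := by
  induction ts generalizing acc with
  | nil => exact h
  | cons t ts ih =>
    simp only [List.foldl_cons]
    apply ih
    unfold pvScanStep
    split
    · rfl
    · exact h

theorem pvScan_sound (targets : List String) (transitions : List (String × String × String)) (allowed : List String) :
    ∀ (ts : List (String × String × String)) (acc : PySem.Set String × Bool),
    (∀ t ∈ ts, t ∈ transitions) →
    (∀ x ∈ acc.1, pvReach targets transitions allowed x) →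
    ∀ y ∈ (ts.foldl (pvScanStep allowed) acc).1, pvReach targets transitions allowed y := by
  intro ts
  induction ts with
  | nil => intro acc _ hacc; exact hacc
  | cons t ts ih =>
    intro acc hsub hacc
    simp only [List.foldl_cons]
    apply ih (pvScanStep allowed acc t) (fun u hu => hsub u (List.mem_cons_of_mem _ hu))
    intro x hx
    unfold pvScanStep at hx
    split at hx
    · rename_i hg
      rw [Bool.and_eq_true, Bool.and_eq_true, Bool.and_eq_true] at hg
      rcases (PySem.Set.mem_add acc.1 t.1 x).mp hx with h | heq
      · exact hacc x h
      · rw [heq]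
        refine pvReach.step t.1 t.2.1 t.2.2 (hsub t List.mem_cons_self)
          (List.mem_of_elem_eq_true hg.1.1.2) (List.mem_of_elem_eq_true hg.1.2) ?_
        exact hacc t.2.2 ((PySem.Set.contains_iff acc.1 t.2.2).mp hg.1.1.1)
    · exact hacc x hx

theorem pvScan_false (allowed : List String) (ts : List (String × String × String))
    (acc : PySem.Set String × Bool) (h : (ts.foldl (pvScanStep allowed) acc).2 = false) :
    (ts.foldl (pvScanStep allowed) acc).1 = acc.1 ∧
    ∀ t ∈ ts, t.2.2 ∈ acc.1 → t.1 ∈ allowed → t.2.2 ∈ allowed → t.1 ∈ acc.1 := by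
  induction ts generalizing acc with
  | nil => exact ⟨rfl, fun t ht => absurd ht (List.not_mem_nil)⟩
  | cons t ts ih =>
    simp only [List.foldl_cons] at h ⊢
    by_cases hg : (PySem.Set.contains acc.1 t.2.2 && allowed.contains t.1 &&
        allowed.contains t.2.2 && !(PySem.Set.contains acc.1 t.1)) = true
    · exfalso
      have hstep : (pvScanStep allowed acc t).2 = true := by
        unfold pvScanStep; rw [if_pos hg]
      rw [pvScan_true allowed ts _ hstep] at h
      simp at h
    · have hstep : pvScanStep allowed acc t = acc := by
        unfold pvScanStep; rw [if_neg hg]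
      rw [hstep] at h ⊢
      obtain ⟨h1, h2⟩ := ih acc h
      refine ⟨h1, ?_⟩
      intro u hu hud hua hud2
      rcases List.mem_cons.mp hu with rfl | hu'
      · by_contra hus
        apply hg
        rw [Bool.and_eq_true, Bool.and_eq_true, Bool.and_eq_true]
        refine ⟨⟨⟨(PySem.Set.contains_iff _ _).mpr hud, List.elem_eq_true_of_mem hua⟩,
          List.elem_eq_true_of_mem hud2⟩, ?_⟩
        simp only [Bool.not_eq_eq_eq_not, Bool.not_true]
        exact Bool.eq_false_iff.mpr (fun hcc => hus ((PySem.Set.contains_iff _ _).mp hcc))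
      · exact h2 u hu' hud hua hud2

theorem pvScan_nodup (allowed : List String) (ts : List (String × String × String))
    (acc : PySem.Set String × Bool) (h : acc.1.Nodup) :
    (ts.foldl (pvScanStep allowed) acc).1.Nodup := by
  induction ts generalizing acc with
  | nil => exact h
  | cons t ts ih =>
    simp only [List.foldl_cons]
    apply ih
    unfold pvScanStep
    split
    · exact PySem.Set.nodup_add acc.1 t.1 h
    · exact h

theorem pvFix_subset (transitions : List (String × String × String)) (allowed : List String)
    (visited : PySem.Set String) : ∀ x ∈ visited, x ∈ pvFix transitions allowed visited := by
  fun_induction pvFix transitions allowed visited with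
  | case1 visited r hr ih =>
    intro x hx
    exact ih x ((pvScan_prefix allowed transitions (visited, false)).subset hx)
  | case2 visited r hr =>
    intro x hx
    exact (pvScan_prefix allowed transitions (visited, false)).subset hx

theorem pvFix_nodup (transitions : List (String × String × String)) (allowed : List String)
    (visited : PySem.Set String) (h : visited.Nodup) : (pvFix transitions allowed visited).Nodup := by
  fun_induction pvFix transitions allowed visited with
  | case1 visited r hr ih => exact ih (pvScan_nodup allowed transitions (visited, false) h)
  | case2 visited r hr => exact pvScan_nodup allowed transitions (visited, false) h

theorem pvFix_sound (targets : List String) (transitions : List (String × String × String)) (allowed : List String) (visited : PySem.Set String)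
    (hacc : ∀ x ∈ visited, pvReach targets transitions allowed x) :
    ∀ y ∈ pvFix transitions allowed visited, pvReach targets transitions allowed y := by
  fun_induction pvFix transitions allowed visited with
  | case1 visited r hr ih =>
    exact ih (pvScan_sound targets transitions allowed transitions (visited, false)
      (fun t ht => ht) hacc)
  | case2 visited r hr =>
    exact pvScan_sound targets transitions allowed transitions (visited, false)
      (fun t ht => ht) hacc

theorem pvFix_closed (transitions : List (String × String × String)) (allowed : List String)
    (visited : PySem.Set String) :
    ∀ p e v, (p, e, v) ∈ transitions → p ∈ allowed → v ∈ allowed →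
      v ∈ pvFix transitions allowed visited → p ∈ pvFix transitions allowed visited := by
  fun_induction pvFix transitions allowed visited with
  | case1 visited r hr ih => exact ih
  | case2 visited r hr =>
    intro p e v he hpa hva hv
    have hr2 : (transitions.foldl (pvScanStep allowed) (visited, false)).2 = false :=
      Bool.eq_false_iff.mpr hr
    obtain ⟨h1, h2⟩ := pvScan_false allowed transitions (visited, false) hr2
    have hv2 : v ∈ (List.foldl (pvScanStep allowed) (visited, false) transitions).1 := hv
    rw [h1] at hv2
    have hp := h2 (p, e, v) he hv2 hpa hva
    show p ∈ (List.foldl (pvScanStep allowed) (visited, false) transitions).1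
    rw [h1]
    exact hp

-- ---- assembling the equivalence ----

theorem pvFix_complete (targets : List String) (transitions : List (String × String × String)) (allowed : List String) (s : String)
    (hs : pvReach targets transitions allowed s) :
    s ∈ pvFix transitions allowed (PySem.Set.ofList (targets.filter (fun t => allowed.contains t))) := by
  induction hs with
  | base t ht hta =>
    apply pvFix_subset
    exact (PySem.Set.mem_ofList _ t).mpr
      (List.mem_filter.mpr ⟨ht, List.elem_eq_true_of_mem hta⟩)
  | step p e v he hpa hva _ ih =>
    exact pvFix_closed transitions allowed _ p e v he hpa hva ih

theorem dfs_complete (targets : List String) (transitions : List (String × String × String)) (allowed : List String)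
    (rev : PySem.Dict String (List String))
    (hrev : ∀ p e v, (p, e, v) ∈ transitions → p ∈ allowed → v ∈ allowed → p ∈ rev.getD v [])
    (stack : List String)
    (hstack : ∀ t ∈ targets, t ∈ allowed → t ∈ stack)
    (s : String) (hs : pvReach targets transitions allowed s) :
    s ∈ pvDfs allowed rev PySem.Set.empty stack := by
  obtain ⟨c1, c2⟩ := dfs_closed targets transitions allowed rev hrev PySem.Set.empty stack
    (fun t ht hta => Or.inr (hstack t ht hta))
    (fun p e v _ _ _ hv => absurd hv (List.not_mem_nil))
  induction hs with
  | base t ht hta => exact c1 t ht hta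
  | step p e v he hpa hva _ ih => exact c2 p e v he hpa hva ih

-- ===== VERDICT (by name: the statement is the Claim_ definition above) =====
theorem reverse_reachable_py_spec : Claim_equal_reverse_reachable_py := by
  intro targets transitions allowed _
  unfold Spec_reverse_reachable_py reverse_reachable_py reverse_reachable_py_alt
  apply PySem.List.sorted_eq_sorted_of_perm _ _ _ (fun a b h => h)
  set ts := PySem.List.sorted2 transitions (fun t => t.1) (fun t => t.2.1) with hts
  have htsmem : ∀ u : String × String × String, u ∈ ts ↔ u ∈ transitions :=
    fun u => (PySem.List.sorted2_perm transitions (fun t => t.1) (fun t => t.2.1) false).mem_iff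
  set rev := ts.foldl (pvRevAdjStep allowed) PySem.Dict.empty with hrevdef
  set stack := (PySem.List.sorted targets (fun t => t) false).filter (fun t => allowed.contains t) with hstk
  have hrev1 : ∀ p v : String, p ∈ rev.getD v [] →
      ∃ e, (p, e, v) ∈ transitions ∧ p ∈ allowed ∧ v ∈ allowed := by
    intro p v hp
    rcases (mem_revAdj allowed ts PySem.Dict.empty p v).mp hp with h | ⟨e, he, hpa, hva⟩
    · rw [PySem.Dict.getD_empty] at h
      exact absurd h (List.not_mem_nil)
    · exact ⟨e, (htsmem _).mp he, hpa, hva⟩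
  have hrev2 : ∀ p e v : String, (p, e, v) ∈ transitions → p ∈ allowed → v ∈ allowed →
      p ∈ rev.getD v [] := by
    intro p e v he hpa hva
    exact (mem_revAdj allowed ts PySem.Dict.empty p v).mpr
      (Or.inr ⟨e, (htsmem _).mpr he, hpa, hva⟩)
  have hstack1 : ∀ x ∈ stack, pvReach targets transitions allowed x := by
    intro x hx
    have := List.mem_filter.mp hx
    exact pvReach.base x ((PySem.List.mem_sorted targets (fun t => t) false x).mp this.1)
      (List.mem_of_elem_eq_true this.2)
  have hstack2 : ∀ t ∈ targets, t ∈ allowed → t ∈ stack := by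
    intro t ht hta
    exact List.mem_filter.mpr ⟨(PySem.List.mem_sorted targets (fun t => t) false t).mpr ht,
      List.elem_eq_true_of_mem hta⟩
  rw [List.perm_ext_iff_of_nodup
    (dfs_nodup allowed rev PySem.Set.empty stack List.nodup_nil)
    (pvFix_nodup transitions allowed _ (PySem.Set.nodup_ofList _))]
  intro a
  constructor
  · intro ha
    exact pvFix_complete targets transitions allowed a
      (dfs_sound targets transitions allowed rev hrev1 PySem.Set.empty stack
        (fun x hx => absurd hx (List.not_mem_nil)) hstack1 a ha)
  · intro ha
    refine dfs_complete targets transitions allowed rev hrev2 stack hstack2 a ?_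
    apply pvFix_sound targets transitions allowed _ _ a ha
    intro x hx
    have := List.mem_filter.mp ((PySem.Set.mem_ofList _ x).mp hx)
    exact pvReach.base x this.1 (List.mem_of_elem_eq_true this.2)
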